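-- pv_equiv track=rewrite | github.com/wannabethere/asthera | complianceskill/indexing_cli/cve_enrich_pipeline.py | _detect_cve_column
-- ===== SOURCE A (Python) =====
-- from typing import Any, Dict, List, Optional
--
-- CVE_COLUMN_CANDIDATES = ("cve_id", "CVE", "cve", "cveId", "CVE ID", "cve-id")
--
-- def _detect_cve_column(headers: List[str]) -> Optional[str]:
--     """Detect which column contains CVE IDs."""
--     for cand in CVE_COLUMN_CANDIDATES:
--         for h in headers:
--             if h.strip().lower() == cand.lower():
--                 return h
--     for h in headers:
--         if "cve" in h.lower():
--             return h
--     return None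
-- ===== SOURCE B (Python) =====
-- CVE_COLUMN_CANDIDATES = ("cve_id", "CVE", "cve", "cveId", "CVE ID", "cve-id")
--
-- def _detect_cve_column(headers):
--     """Detect which column contains CVE IDs.
--
--     Single pass: each header gets a priority rank (index of the matching
--     candidate, 6 for a mere 'cve' substring, None otherwise) and the
--     best-ranked header is kept, the earliest minimum winning.
--     """
--     lowered = [c.lower() for c in CVE_COLUMN_CANDIDATES]
--
--     def rank(h):
--         n = h.strip().lower()
--         if n in lowered:
--             return lowered.index(n)
--         if "cve" in h.lower():
--             return len(lowered)
--         return None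
--
--     best = None  # (rank, header)
--     for h in headers:
--         r = rank(h)
--         if r is not None and (best is None or r < best[0]):
--             best = (r, h)
--     return best[1] if best is not None else None
-- ===== Notes on version B (the rewrite author's own statement) =====
-- stated objective: faster
-- what changed: B replaces A's staged scans (one header scan per candidate, then a substring fallback scan) with a single left-to-right pass that assigns each header a priority rank (candidate index, 6 for a 'cve' substring, none otherwise) and keeps the first header of minimal rank.
import Mathlib
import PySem

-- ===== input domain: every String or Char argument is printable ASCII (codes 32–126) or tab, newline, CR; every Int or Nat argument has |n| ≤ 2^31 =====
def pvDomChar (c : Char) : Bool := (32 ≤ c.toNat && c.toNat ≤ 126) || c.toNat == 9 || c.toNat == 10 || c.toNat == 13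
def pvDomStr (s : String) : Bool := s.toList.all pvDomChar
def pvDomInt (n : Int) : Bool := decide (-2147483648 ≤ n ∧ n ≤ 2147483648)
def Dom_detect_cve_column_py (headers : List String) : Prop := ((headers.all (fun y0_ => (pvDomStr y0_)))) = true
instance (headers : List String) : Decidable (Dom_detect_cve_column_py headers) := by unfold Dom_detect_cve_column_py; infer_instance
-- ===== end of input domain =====

-- B replaces A's staged scans (one per candidate, then a substring fallback scan) with a single recursive pass keeping the best-ranked header (earlier wins ties); same result, different traversal.


-- ===== PORT A =====
-- CVE_COLUMN_CANDIDATES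
def pvCands : List String := ["cve_id", "CVE", "cve", "cveId", "CVE ID", "cve-id"]

-- h.strip().lower()
def pvNorm (h : String) : String := PySem.Str.lower (PySem.Str.strip h)

-- inner loop: first header h with h.strip().lower() == cand.lower()
def aInner (cand : String) : List String → Option String
  | [] => none
  | h :: t => if pvNorm h == PySem.Str.lower cand then some h else aInner cand t

-- outer loop over the candidates
def aOuter (headers : List String) : List String → Option String
  | [] => none
  | c :: cs =>
      match aInner c headers with
      | some h => some h
      | none => aOuter headers cs

-- fallback loop: first h with "cve" in h.lower()
def aFallback : List String → Option String
  | [] => none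
  | h :: t => if PySem.Str.isIn "cve" (PySem.Str.lower h) then some h else aFallback t

def detect_cve_column_py (headers : List String) : Option String :=
  match aOuter headers pvCands with
  | some h => some h
  | none => aFallback headers

-- ===== PORT B =====
-- lowered = [c.lower() for c in CVE_COLUMN_CANDIDATES]
def bLowered : List String := pvCands.map PySem.Str.lower

-- rank(h): candidate index if the stripped-lowercased header is a candidate, len(lowered)=6 for a
-- mere 'cve' substring, None otherwise.  'lowered.index(n)' is guarded by 'n in lowered', so
-- PySem.List.index? is 'some' exactly there and we return that Option directly (exact).
def bRank (h : String) : Option Nat :=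
  let n := pvNorm h
  if bLowered.contains n then PySem.List.index? bLowered n
  else if PySem.Str.isIn "cve" (PySem.Str.lower h) then some bLowered.length
  else none

-- one pass: best = (rank, header), replaced only on a strictly smaller rank (earliest minimum wins)
def bStep (best : Option (Nat × String)) (h : String) : Option (Nat × String) :=
  match bRank h with
  | none => best
  | some r =>
      match best with
      | none => some (r, h)
      | some (rb, b) => if r < rb then some (r, h) else some (rb, b)

-- best[1] if best is not None else None
def detect_cve_column_py_alt (headers : List String) : Option String :=
  match headers.foldl bStep none with
  | some rb => some rb.2
  | none => none

-- ===== PRECONDITION & SPEC =====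
def Spec_detect_cve_column_py (headers : List String) (out : Option String) : Prop := out = detect_cve_column_py_alt headers
instance (headers : List String) (out : Option String) : Decidable (Spec_detect_cve_column_py headers out) := by unfold Spec_detect_cve_column_py; infer_instance

-- ===== CLAIM (what is proved, stated in full; the proofs are below) =====
def Claim_equal_detect_cve_column_py : Prop := ∀ (headers : List String), Dom_detect_cve_column_py headers → Spec_detect_cve_column_py headers (detect_cve_column_py headers)

-- ===== LEMMAS AND PROOFS =====

-- total rank: 7 = irrelevant header
def rk (h : String) : Nat := (bRank h).getD 7

-- minimum rank of a header list (7 when empty)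
def pm : List String → Nat
  | [] => 7
  | h :: t => min (rk h) (pm t)

theorem bLowered_eq : bLowered = ["cve_id", "cve", "cve", "cveid", "cve id", "cve-id"] := by decide

theorem rk_eq (h : String) : rk h =
    if pvNorm h = "cve_id" then 0
    else if pvNorm h = "cve" then 1
    else if pvNorm h = "cveid" then 3
    else if pvNorm h = "cve id" then 4
    else if pvNorm h = "cve-id" then 5
    else if PySem.Str.isIn "cve" (PySem.Str.lower h) then 6
    else 7 := by
  unfold rk bRank
  rw [bLowered_eq]
  by_cases h0 : pvNorm h = "cve_id" <;>
  by_cases h1 : pvNorm h = "cve" <;>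
  by_cases h3 : pvNorm h = "cveid" <;>
  by_cases h4 : pvNorm h = "cve id" <;>
  by_cases h5 : pvNorm h = "cve-id" <;>
    simp_all [PySem.List.index?_eq_idxOf?, List.idxOf?, List.findIdx?] <;> first | decide | (split_ifs <;> rfl)

theorem rk_ne_two (h : String) : rk h ≠ 2 := by
  rw [rk_eq]; split_ifs <;> omega

theorem rk_le_seven (h : String) : rk h ≤ 7 := by
  rw [rk_eq]; split_ifs <;> omega

theorem pm_le_seven (hs : List String) : pm hs ≤ 7 := by
  induction hs with
  | nil => simp [pm]
  | cons h t ih => simp [pm]; omega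

theorem pm_le_of_mem {hs : List String} {h : String} (hm : h ∈ hs) : pm hs ≤ rk h := by
  induction hs with
  | nil => cases hm
  | cons x t ih =>
    rcases List.mem_cons.mp hm with rfl | hm'
    · simp [pm]
    · have := ih hm'; simp [pm]; omega

theorem pm_achieved (hs : List String) : pm hs = 7 ∨ ∃ h ∈ hs, rk h = pm hs := by
  induction hs with
  | nil => left; rfl
  | cons x t ih =>
    by_cases hx : rk x ≤ pm t
    · right; exact ⟨x, List.mem_cons_self, by simp [pm]; omega⟩
    · have hpm : pm (x :: t) = pm t := by simp [pm]; omega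
      rcases ih with h7 | ⟨h, hm, hr⟩
      · left; rw [hpm, h7]
      · right; exact ⟨h, List.mem_cons_of_mem _ hm, by rw [hpm, hr]⟩

theorem bRank_some_rk {h : String} {r : Nat} (he : bRank h = some r) : rk h = r := by
  simp [rk, he]

theorem bRank_none_rk {h : String} (he : bRank h = none) : rk h = 7 := by
  simp [rk, he]

theorem bRank_some_le {h : String} {r : Nat} (he : bRank h = some r) : r ≤ 6 := by
  have h7 := rk_le_seven h
  rw [bRank_some_rk he] at h7
  rcases Nat.lt_or_ge r 7 with hlt | hge
  · omega
  · -- r = 7 would mean bRank h = some 7, impossible: ranks come from index? (< 6) or the literal 6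
    exfalso
    unfold bRank at he
    simp only [bLowered_eq] at he
    split at he
    · rcases (PySem.List.index?_eq_some_iff _ _ _).mp he with ⟨pre, suf, heq, hlen, _⟩
      have := congrArg List.length heq
      simp at this
      omega
    · split at he
      · simp at he; omega
      · simp at he

-- rank an accumulator competes at (7 = empty)
def accR : Option (Nat × String) → Nat
  | none => 7
  | some (rb, _) => rb

-- B's fold returns the first header of minimal rank when it beats the accumulator
theorem bFold_spec (hs : List String) : ∀ (acc : Option (Nat × String)), accR acc ≤ 7 →
    hs.foldl bStep acc =
      if pm hs < accR acc then (hs.find? (fun h => rk h == pm hs)).map (fun b => (pm hs, b)) else acc := by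
  induction hs with
  | nil =>
    intro acc hacc
    have : ¬ pm ([] : List String) < accR acc := by simp [pm]; omega
    simp [this]
  | cons h t ih =>
    intro acc hacc
    have hpm : pm (h :: t) = min (rk h) (pm t) := rfl
    have ht7 := pm_le_seven t
    rw [List.foldl_cons]
    cases hb : bRank h with
    | none =>
      have h7 : rk h = 7 := bRank_none_rk hb
      have hstep : bStep acc h = acc := by simp [bStep, hb]
      have hmin : pm (h :: t) = pm t := by rw [hpm, h7]; omega
      rw [hstep, ih acc hacc, hmin]
      by_cases hc : pm t < accR acc
      · have hne : ¬ ((fun x => rk x == pm t) h = true) := by simp [h7]; omega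
        rw [List.find?_cons_of_neg (p := fun x => rk x == pm t) (a := h) (l := t) hne]
      · rw [if_neg hc, if_neg hc]
    | some r =>
      have hr : rk h = r := bRank_some_rk hb
      have hr6 : r ≤ 6 := bRank_some_le hb
      by_cases himp : r < accR acc
      · -- the head improves on the accumulator
        have hstep : bStep acc h = some (r, h) := by
          cases acc with
          | none => simp [bStep, hb]
          | some rb =>
            cases rb with
            | mk rb b => simp [accR] at himp; simp [bStep, hb, himp]
        have haccR : accR (some (r, h)) = r := rfl
        rw [hstep, ih _ (by rw [haccR]; omega), haccR]
        have hcond : pm (h :: t) < accR acc := by rw [hpm]; omega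
        rw [if_pos hcond]
        by_cases hcmp : pm t < r
        · have hmin : pm (h :: t) = pm t := by rw [hpm]; omega
          have hne : ¬ ((fun x => rk x == pm (h :: t)) h = true) := by simp [hr, hmin]; omega
          rw [List.find?_cons_of_neg (p := fun x => rk x == pm (h :: t)) (a := h) (l := t) hne, hmin,
            if_pos hcmp]
        · have hmin : pm (h :: t) = r := by rw [hpm]; omega
          have hfind : List.find? (fun x => rk x == pm (h :: t)) (h :: t) = some h :=
            List.find?_cons_of_pos (p := fun x => rk x == pm (h :: t)) (a := h) (l := t) (by simp [hr, hmin])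
          rw [hfind, hmin, if_neg hcmp]
          rfl
      · -- accumulator keeps its (earlier, at-least-as-good) entry
        have hstep : bStep acc h = acc := by
          cases acc with
          | none => simp [accR] at himp; omega
          | some rb =>
            cases rb with
            | mk rb b => simp [accR] at himp; simp [bStep, hb]; omega
        rw [hstep, ih acc hacc]
        have hcond : (pm (h :: t) < accR acc) ↔ (pm t < accR acc) := by rw [hpm]; omega
        by_cases hc : pm t < accR acc
        · have hc' : pm (h :: t) < accR acc := hcond.mpr hc
          have hmin : pm (h :: t) = pm t := by rw [hpm]; omega
          have hne : ¬ ((fun x => rk x == pm (h :: t)) h = true) := by simp [hr, hmin]; omega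
          rw [if_pos hc, if_pos hc',
            List.find?_cons_of_neg (p := fun x => rk x == pm (h :: t)) (a := h) (l := t) hne, hmin]
        · rw [if_neg hc, if_neg (fun hh => hc (hcond.mp hh))]

theorem bGo_spec (hs : List String) :
    hs.foldl bStep none = if pm hs ≤ 6 then (hs.find? (fun h => rk h == pm hs)).map (fun b => (pm hs, b)) else none := by
  rw [bFold_spec hs none (by simp [accR])]
  have : (pm hs < accR none) ↔ (pm hs ≤ 6) := by simp [accR]; omega
  by_cases hle : pm hs ≤ 6
  · rw [if_pos (this.mpr hle), if_pos hle]
  · rw [if_neg (fun hh => hle (this.mp hh)), if_neg hle]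

-- pointwise: the candidate-equality predicates are the rank predicates
theorem pred0 : (fun h => pvNorm h == PySem.Str.lower "cve_id") = (fun h => rk h == (0 : Nat)) := by
  funext h; rw [rk_eq]
  have : PySem.Str.lower "cve_id" = "cve_id" := by decide
  rw [this]; split_ifs <;> simp_all

theorem pred1 : (fun h => pvNorm h == PySem.Str.lower "CVE") = (fun h => rk h == (1 : Nat)) := by
  funext h; rw [rk_eq]
  have : PySem.Str.lower "CVE" = "cve" := by decide
  rw [this]; split_ifs <;> simp_all

theorem pred2 : (fun h => pvNorm h == PySem.Str.lower "cve") = (fun h => rk h == (1 : Nat)) := by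
  funext h; rw [rk_eq]
  have : PySem.Str.lower "cve" = "cve" := by decide
  rw [this]; split_ifs <;> simp_all

theorem pred3 : (fun h => pvNorm h == PySem.Str.lower "cveId") = (fun h => rk h == (3 : Nat)) := by
  funext h; rw [rk_eq]
  have : PySem.Str.lower "cveId" = "cveid" := by decide
  rw [this]; split_ifs <;> simp_all

theorem pred4 : (fun h => pvNorm h == PySem.Str.lower "CVE ID") = (fun h => rk h == (4 : Nat)) := by
  funext h; rw [rk_eq]
  have : PySem.Str.lower "CVE ID" = "cve id" := by decide
  rw [this]; split_ifs <;> simp_all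

theorem pred5 : (fun h => pvNorm h == PySem.Str.lower "cve-id") = (fun h => rk h == (5 : Nat)) := by
  funext h; rw [rk_eq]
  have : PySem.Str.lower "cve-id" = "cve-id" := by decide
  rw [this]; split_ifs <;> simp_all

theorem aInner_eq_find (c : String) (hs : List String) :
    aInner c hs = hs.find? (fun h => pvNorm h == PySem.Str.lower c) := by
  induction hs with
  | nil => rfl
  | cons h t ih =>
    by_cases hc : (pvNorm h == PySem.Str.lower c) = true
    · rw [aInner, if_pos hc,
        List.find?_cons_of_pos (p := fun h => pvNorm h == PySem.Str.lower c) (a := h) (l := t) hc]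
    · rw [aInner, if_neg hc, ih,
        List.find?_cons_of_neg (p := fun h => pvNorm h == PySem.Str.lower c) (a := h) (l := t) hc]

theorem aFallback_eq_find (hs : List String) :
    aFallback hs = hs.find? (fun h => PySem.Str.isIn "cve" (PySem.Str.lower h)) := by
  induction hs with
  | nil => rfl
  | cons h t ih =>
    by_cases hc : (PySem.Str.isIn "cve" (PySem.Str.lower h)) = true
    · rw [aFallback, if_pos hc,
        List.find?_cons_of_pos (p := fun x => PySem.Str.isIn "cve" (PySem.Str.lower x)) (a := h) (l := t) hc]
    · rw [aFallback, if_neg hc, ih,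
        List.find?_cons_of_neg (p := fun x => PySem.Str.isIn "cve" (PySem.Str.lower x)) (a := h) (l := t) hc]

theorem find?_congr_mem {α : Type} {p q : α → Bool} {l : List α}
    (h : ∀ x ∈ l, p x = q x) : l.find? p = l.find? q := by
  induction l with
  | nil => rfl
  | cons x t ih =>
    have hx := h x List.mem_cons_self
    simp only [List.find?, hx]
    split
    · rfl
    · exact ih (fun y hy => h y (List.mem_cons_of_mem _ hy))

-- helper: a successful find? at rank i pins pm to i (given pm ≥ previous failures)
theorem pm_eq_of_find {hs : List String} {i : Nat} {h : String}
    (hf : hs.find? (fun x => rk x == i) = some h) (hlo : i ≤ pm hs) : pm hs = i := by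
  have hm := List.mem_of_find?_eq_some hf
  have hp := List.find?_some hf
  have : rk h = i := by simpa using hp
  have := pm_le_of_mem hm
  omega

theorem find_none_rk {hs : List String} {i : Nat}
    (hf : hs.find? (fun x => rk x == i) = none) : ∀ x ∈ hs, rk x ≠ i := by
  intro x hx
  have := List.find?_eq_none.mp hf x hx
  simpa using this

-- A returns the first header of minimal rank
theorem a_spec (hs : List String) :
    detect_cve_column_py hs = if pm hs ≤ 6 then hs.find? (fun h => rk h == pm hs) else none := by
  unfold detect_cve_column_py
  show (match aOuter hs pvCands with
        | some h => some h
        | none => aFallback hs) = _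
  simp only [pvCands, aOuter, aInner_eq_find, pred0, pred1, pred2, pred3, pred4, pred5]
  cases hf0 : hs.find? (fun x => rk x == (0 : Nat)) with
  | some h =>
    have hpm : pm hs = 0 := pm_eq_of_find hf0 (Nat.zero_le _)
    simp [hpm, hf0]
  | none =>
  have hn0 := find_none_rk hf0
  cases hf1 : hs.find? (fun x => rk x == (1 : Nat)) with
  | some h =>
    have hlo : 1 ≤ pm hs := by
      rcases pm_achieved hs with h7 | ⟨x, hx, hr⟩
      · omega
      · have := hn0 x hx; omega
    have hpm : pm hs = 1 := pm_eq_of_find hf1 hlo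
    simp [hpm, hf1]
  | none =>
  have hn1 := find_none_rk hf1
  cases hf3 : hs.find? (fun x => rk x == (3 : Nat)) with
  | some h =>
    have hlo : 3 ≤ pm hs := by
      rcases pm_achieved hs with h7 | ⟨x, hx, hr⟩
      · omega
      · have := hn0 x hx; have := hn1 x hx; have := rk_ne_two x; omega
    have hpm : pm hs = 3 := pm_eq_of_find hf3 hlo
    simp [hpm, hf3]
  | none =>
  have hn3 := find_none_rk hf3
  cases hf4 : hs.find? (fun x => rk x == (4 : Nat)) with
  | some h =>
    have hlo : 4 ≤ pm hs := by
      rcases pm_achieved hs with h7 | ⟨x, hx, hr⟩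
      · omega
      · have := hn0 x hx; have := hn1 x hx; have := hn3 x hx; have := rk_ne_two x; omega
    have hpm : pm hs = 4 := pm_eq_of_find hf4 hlo
    simp [hpm, hf4]
  | none =>
  have hn4 := find_none_rk hf4
  cases hf5 : hs.find? (fun x => rk x == (5 : Nat)) with
  | some h =>
    have hlo : 5 ≤ pm hs := by
      rcases pm_achieved hs with h7 | ⟨x, hx, hr⟩
      · omega
      · have := hn0 x hx; have := hn1 x hx; have := hn3 x hx; have := hn4 x hx
        have := rk_ne_two x; omega
    have hpm : pm hs = 5 := pm_eq_of_find hf5 hlo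
    simp [hpm, hf5]
  | none =>
  have hn5 := find_none_rk hf5
  -- no header matches any candidate: every rank is 6 or 7
  have hge : ∀ x ∈ hs, rk x = 6 ∨ rk x = 7 := by
    intro x hx
    have := hn0 x hx; have := hn1 x hx; have := hn3 x hx; have := hn4 x hx
    have := hn5 x hx; have := rk_ne_two x; have := rk_le_seven x
    omega
  have hsub : ∀ x ∈ hs, (PySem.Str.isIn "cve" (PySem.Str.lower x)) = (rk x == (6 : Nat)) := by
    intro x hx
    rcases hge x hx with h6 | h7
    · rw [h6]
      have := rk_eq x
      rw [h6] at this
      split_ifs at this <;> simp_all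
    · rw [h7]
      have := rk_eq x
      rw [h7] at this
      split_ifs at this <;> simp_all
  rw [aFallback_eq_find, find?_congr_mem hsub]
  rcases pm_achieved hs with h7 | ⟨x, hx, hr⟩
  · have h67 : ¬ pm hs ≤ 6 := by omega
    have : hs.find? (fun x => rk x == (6 : Nat)) = none := by
      apply List.find?_eq_none.mpr
      intro y hy
      have hle := pm_le_of_mem hy
      simp; omega
    simp [h67, this]
  · rcases hge x hx with h6 | hx7
    · have hpm6 : pm hs = 6 := by
        have := pm_le_of_mem hx
        have hlo : 6 ≤ pm hs := by
          rcases pm_achieved hs with h7' | ⟨y, hy, hry⟩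
          · omega
          · rcases hge y hy with h | h <;> omega
        omega
      simp [hpm6]
    · -- achiever has rank 7: pm = 7
      have hpm7 : pm hs = 7 := by rw [← hr, hx7]
      have h67 : ¬ pm hs ≤ 6 := by omega
      have : hs.find? (fun x => rk x == (6 : Nat)) = none := by
        apply List.find?_eq_none.mpr
        intro y hy
        have hle := pm_le_of_mem hy
        simp; omega
      simp [h67, this]

-- ===== VERDICT (by name: the statement is the Claim_ definition above) =====
theorem detect_cve_column_py_spec : Claim_equal_detect_cve_column_py := by
  intro hs _
  unfold Spec_detect_cve_column_py detect_cve_column_py_alt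
  rw [a_spec, bGo_spec]
  by_cases hle : pm hs ≤ 6
  · simp only [hle, if_true]
    cases hs.find? (fun h => rk h == pm hs) <;> rfl
  · simp [hle]
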